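-- pv_equiv track=rewrite | github.com/nlammers371/morphseq | src/analyze/trajectory_analysis/clustering/bootstrap_clustering.py | _label_to_key
-- ===== SOURCE A (Python) =====
-- from typing import Dict, List, Any, Optional, Tuple
--
-- def _label_to_key(label: Any) -> str:
--     """Convert label to a safe column suffix."""
--     label_str = str(label).strip().lower()
--     cleaned = []
--     prev_underscore = False
--     for ch in label_str:
--         if ch.isalnum():
--             cleaned.append(ch)
--             prev_underscore = False
--         else:
--             if not prev_underscore:
--                 cleaned.append('_')
--                 prev_underscore = True
--     key = ''.join(cleaned).strip('_')
--     return key or "label"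
-- ===== SOURCE B (Python) =====
-- from itertools import groupby
--
-- def _label_to_key(label):
--     """Convert label to a safe column suffix."""
--     label_str = str(label).strip().lower()
--     key = "_".join("".join(g) for k, g in groupby(label_str, key=str.isalnum) if k)
--     return key or "label"
-- ===== Notes on version B (the rewrite author's own statement) =====
-- stated objective: idiomatic
-- what changed: B replaces A's character loop with a prev_underscore state flag and a final strip of underscores by splitting the string into maximal alphanumeric runs with itertools.groupby and joining the runs with single underscores.
import Mathlib
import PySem

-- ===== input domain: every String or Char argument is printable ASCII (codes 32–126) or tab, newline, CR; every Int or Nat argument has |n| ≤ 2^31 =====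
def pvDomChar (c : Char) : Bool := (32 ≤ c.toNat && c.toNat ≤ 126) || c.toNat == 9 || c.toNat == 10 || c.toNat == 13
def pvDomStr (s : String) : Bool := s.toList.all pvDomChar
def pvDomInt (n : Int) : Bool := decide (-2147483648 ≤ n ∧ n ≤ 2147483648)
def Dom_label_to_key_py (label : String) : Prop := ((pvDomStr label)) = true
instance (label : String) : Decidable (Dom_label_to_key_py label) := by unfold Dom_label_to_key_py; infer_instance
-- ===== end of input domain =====

-- B replaces A's char-by-char loop with a prev_underscore flag by splitting the string
-- into maximal alphanumeric runs (itertools.groupby) joined with '_' (objective: idiomatic).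

-- ===== PORT A =====
def label_to_key_py (label : String) : String :=
  let labelStr := PySem.Str.lower (PySem.Str.strip label)
  let st := labelStr.toList.foldl
    (fun (st : List Char × Bool) ch =>
      if PySem.Chars.isalnum ch then (st.1 ++ [ch], false)
      else if st.2 = false then (st.1 ++ ['_'], true) else st)
    ([], false)
  let key := PySem.Chars.stripChars st.1 ['_']
  if key = [] then "label" else String.ofList key

-- ===== PORT B =====
-- maximal alphanumeric runs of the string, in order (the `if k` groups of groupby)
def pvAlnumTokens : List Char → List (List Char)
  | [] => []
  | c :: cs =>
    if PySem.Chars.isalnum c then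
      (c :: cs.takeWhile PySem.Chars.isalnum) :: pvAlnumTokens (cs.dropWhile PySem.Chars.isalnum)
    else pvAlnumTokens cs
termination_by ls => ls.length
decreasing_by
  · exact Nat.lt_succ_of_le (List.length_dropWhile_le _ _)
  · exact Nat.lt_succ_self _

def label_to_key_py_alt (label : String) : String :=
  let labelStr := PySem.Str.lower (PySem.Str.strip label)
  let key := PySem.Chars.join ['_'] (pvAlnumTokens labelStr.toList)
  if key = [] then "label" else String.ofList key

-- ===== PRECONDITION & SPEC =====
def Spec_label_to_key_py (label : String) (out : String) : Prop := out = label_to_key_py_alt label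
instance (label : String) (out : String) : Decidable (Spec_label_to_key_py label out) := by unfold Spec_label_to_key_py; infer_instance

-- ===== CLAIM (what is proved, stated in full; the proofs are below) =====
def Claim_equal_label_to_key_py : Prop := ∀ (label : String), Dom_label_to_key_py label → Spec_label_to_key_py label (label_to_key_py label)

-- ===== LEMMAS AND PROOFS =====

-- the underscore predicate used by strip('_')
def pvP (c : Char) : Bool := ['_'].contains c

-- A's loop body, as a recursion on the remaining characters (flag = prev_underscore)
def pvClean : Bool → List Char → List Char
  | _, [] => []
  | f, c :: cs =>
    if PySem.Chars.isalnum c then c :: pvClean false cs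
    else if !f then '_' :: pvClean true cs else pvClean true cs

def pvFlag : Bool → List Char → Bool
  | f, [] => f
  | _, c :: cs => if PySem.Chars.isalnum c then pvFlag false cs else pvFlag true cs

def pvRstrip (xs : List Char) : List Char := (xs.reverse.dropWhile pvP).reverse

theorem pvP_underscore : pvP '_' = true := by decide

theorem pvP_of_alnum {c : Char} (h : PySem.Chars.isalnum c = true) : pvP c = false := by
  by_cases hc : c = '_'
  · subst hc; exact absurd h (by decide)
  · simp only [pvP, List.contains_cons, List.contains_nil, Bool.or_false, beq_iff_eq]
    simp [hc]

theorem pv_fold (ls : List Char) : ∀ (acc : List Char) (f : Bool),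
    ls.foldl (fun (st : List Char × Bool) ch =>
      if PySem.Chars.isalnum ch then (st.1 ++ [ch], false)
      else if st.2 = false then (st.1 ++ ['_'], true) else st) (acc, f)
    = (acc ++ pvClean f ls, pvFlag f ls) := by
  induction ls with
  | nil => intro acc f; simp [pvClean, pvFlag]
  | cons c cs ih =>
    intro acc f
    rw [List.foldl_cons]
    by_cases h : PySem.Chars.isalnum c = true
    · simp only [h, if_true, if_pos]
      rw [ih]
      simp [pvClean, pvFlag, h]
    · cases f with
      | false =>
        simp only [h, if_neg, Bool.false_eq_true, not_false_eq_true, reduceIte, if_true]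
        rw [ih]
        simp [pvClean, pvFlag, h]
      | true =>
        simp only [h, if_neg, Bool.false_eq_true, Bool.true_eq_false, not_false_eq_true,
          reduceIte, if_true]
        rw [ih]
        simp [pvClean, pvFlag, h]

theorem pvClean_true_nonalnum {c : Char} (h : ¬ PySem.Chars.isalnum c = true) (cs : List Char) :
    pvClean true (c :: cs) = pvClean true cs := by
  simp [pvClean, h]

theorem pvClean_alnum {c : Char} (h : PySem.Chars.isalnum c = true) (f : Bool) (cs : List Char) :
    pvClean f (c :: cs) = c :: pvClean false cs := by
  cases f <;> simp [pvClean, h]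

-- clean false over a maximal alnum run
theorem pvClean_run (ls : List Char) :
    pvClean false ls = ls.takeWhile PySem.Chars.isalnum ++
      pvClean false (ls.dropWhile PySem.Chars.isalnum) := by
  induction ls with
  | nil => simp
  | cons c cs ih =>
    by_cases h : PySem.Chars.isalnum c = true
    · simp [pvClean_alnum h, List.takeWhile_cons, List.dropWhile_cons, h, ih]
    · simp [List.takeWhile_cons, List.dropWhile_cons, h]

theorem pv_dropWhile_eq_self {p : Char → Bool} {xs : List Char}
    (h : ∀ c ∈ xs, p c = false) : xs.dropWhile p = xs := by
  cases xs with
  | nil => rfl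
  | cons c cs => simp [List.dropWhile_cons, h c (by simp)]

theorem pvRstrip_of_alnum {xs : List Char} (h : ∀ c ∈ xs, PySem.Chars.isalnum c = true) :
    pvRstrip xs = xs := by
  unfold pvRstrip
  rw [pv_dropWhile_eq_self (by intro c hc; exact pvP_of_alnum (h c (List.mem_reverse.mp hc)))]
  exact List.reverse_reverse xs

theorem pvRstrip_append_underscore (xs : List Char) :
    pvRstrip (xs ++ ['_']) = pvRstrip xs := by
  unfold pvRstrip
  simp [List.dropWhile_cons, pvP_underscore]

theorem pvRstrip_append {A X : List Char} (h : pvRstrip X ≠ []) :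
    pvRstrip (A ++ X) = A ++ pvRstrip X := by
  unfold pvRstrip at *
  have hne : (X.reverse.dropWhile pvP).isEmpty = false := by
    rcases hd : X.reverse.dropWhile pvP with _ | _
    · exact absurd (by simp [hd]) h
    · simp [hd]
  rw [List.reverse_append, List.dropWhile_append, hne]
  simp

theorem pvTokens_ne_nil : ∀ (ls : List Char), ∀ t ∈ pvAlnumTokens ls, t ≠ [] := by
  intro ls
  induction ls using pvAlnumTokens.induct with
  | case1 => simp [pvAlnumTokens]
  | case2 c cs h ih =>
    intro t ht
    rw [pvAlnumTokens, if_pos h] at ht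
    rcases List.mem_cons.mp ht with h1 | h1
    · subst h1; simp
    · exact ih t h1
  | case3 c cs h ih =>
    intro t ht
    rw [pvAlnumTokens, if_neg h] at ht
    exact ih t ht

theorem pvTokens_nil_iff : ∀ (ls : List Char),
    pvAlnumTokens ls = [] ↔ ∀ c ∈ ls, PySem.Chars.isalnum c = false := by
  intro ls
  induction ls using pvAlnumTokens.induct with
  | case1 => simp [pvAlnumTokens]
  | case2 c cs h ih =>
    rw [pvAlnumTokens, if_pos h]
    simp [h]
  | case3 c cs h ih =>
    rw [pvAlnumTokens, if_neg h]
    simp only [Bool.not_eq_true] at h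
    simp [ih, h]

theorem pvClean_true_all_nonalnum : ∀ (ls : List Char),
    (∀ c ∈ ls, PySem.Chars.isalnum c = false) → pvClean true ls = [] := by
  intro ls
  induction ls with
  | nil => intro _; rfl
  | cons c cs ih =>
    intro h
    rw [pvClean_true_nonalnum (by simp [h c (by simp)]) cs]
    exact ih (fun d hd => h d (by simp [hd]))

theorem pvJoin_cons_ne_nil {t : List Char} {ts : List (List Char)} (h : t ≠ []) :
    PySem.Chars.join ['_'] (t :: ts) ≠ [] := by
  cases ts with
  | nil => rw [PySem.Chars.join_singleton]; exact h
  | cons u us =>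
    rw [PySem.Chars.join_cons_cons]
    simp [h]

-- main invariant: rstrip-of-clean-with-flag-set equals the joined tokens
theorem pvR' : ∀ (ls : List Char),
    pvRstrip (pvClean true ls) = PySem.Chars.join ['_'] (pvAlnumTokens ls) := by
  intro ls
  induction ls using pvAlnumTokens.induct with
  | case1 => simp [pvAlnumTokens, pvClean, pvRstrip]
  | case2 c cs h ih =>
    rw [pvAlnumTokens, if_pos h, pvClean_alnum h, pvClean_run cs]
    set tok : List Char := c :: cs.takeWhile PySem.Chars.isalnum with htok
    set rest : List Char := cs.dropWhile PySem.Chars.isalnum with hrest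
    have htokal : ∀ d ∈ tok, PySem.Chars.isalnum d = true := by
      intro d hd
      rcases List.mem_cons.mp hd with h1 | h1
      · subst h1; exact h
      · exact List.mem_takeWhile_imp h1
    have hgoal : c :: (cs.takeWhile PySem.Chars.isalnum ++ pvClean false rest)
        = tok ++ pvClean false rest := by simp [htok]
    rw [hgoal]
    rcases hr : rest with _ | ⟨d, ds⟩
    · -- rest empty: clean false rest = []
      simp only [pvClean, pvAlnumTokens]
      rw [List.append_nil, pvRstrip_of_alnum htokal, PySem.Chars.join_singleton]
    · have hd : PySem.Chars.isalnum d = false := by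
        have := List.dropWhile_get_zero_not (p := PySem.Chars.isalnum) (l := cs)
          (by rw [← hrest, hr]; simp)
        · simpa [← hrest, hr] using this
      have hcf : pvClean false (d :: ds) = '_' :: pvClean true (d :: ds) := by
        rw [pvClean_true_nonalnum (by simp [hd]) ds]
        simp [pvClean, hd]
      rw [hcf, ← hr]
      rcases ht : pvAlnumTokens rest with _ | ⟨t, ts⟩
      · -- no more tokens: rest all nonalnum, clean true rest = []
        have hall := (pvTokens_nil_iff rest).mp ht
        rw [pvClean_true_all_nonalnum rest hall]
        rw [show tok ++ '_' :: ([] : List Char) = tok ++ ['_'] from rfl]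
        rw [pvRstrip_append_underscore, pvRstrip_of_alnum htokal,
          PySem.Chars.join_singleton]
      · have hne : pvRstrip (pvClean true rest) ≠ [] := by
          rw [ih, ht]
          exact pvJoin_cons_ne_nil (pvTokens_ne_nil rest t (by rw [ht]; simp))
        have : tok ++ '_' :: pvClean true rest = (tok ++ ['_']) ++ pvClean true rest := by
          simp
        rw [this, pvRstrip_append hne, ih, ht, PySem.Chars.join_cons_cons]
  | case3 c cs h ih =>
    rw [pvAlnumTokens, if_neg h, pvClean_true_nonalnum h cs]
    exact ih

theorem pv_dropU_clean_true (ls : List Char) :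
    (pvClean true ls).dropWhile pvP = pvClean true ls := by
  induction ls with
  | nil => rfl
  | cons c cs ih =>
    by_cases h : PySem.Chars.isalnum c = true
    · rw [pvClean_alnum h]
      simp [List.dropWhile_cons, pvP_of_alnum h]
    · rw [pvClean_true_nonalnum h cs]; exact ih

theorem pv_dropU_clean_false (ls : List Char) :
    (pvClean false ls).dropWhile pvP = pvClean true ls := by
  cases ls with
  | nil => rfl
  | cons c cs =>
    by_cases h : PySem.Chars.isalnum c = true
    · rw [pvClean_alnum h, pvClean_alnum h]
      simp [List.dropWhile_cons, pvP_of_alnum h]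
    · have : pvClean false (c :: cs) = '_' :: pvClean true cs := by simp [pvClean, h]
      rw [this, pvClean_true_nonalnum h cs]
      simp only [List.dropWhile_cons, pvP_underscore, if_pos]
      exact pv_dropU_clean_true cs

theorem pvMain (ls : List Char) :
    PySem.Chars.stripChars (pvClean false ls) ['_'] =
      PySem.Chars.join ['_'] (pvAlnumTokens ls) := by
  show pvRstrip ((pvClean false ls).dropWhile pvP) = _
  rw [pv_dropU_clean_false, pvR']

-- ===== VERDICT (by name: the statement is the Claim_ definition above) =====
theorem label_to_key_py_spec : Claim_equal_label_to_key_py := by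
  intro label _
  unfold Spec_label_to_key_py label_to_key_py label_to_key_py_alt
  simp only [pv_fold, List.nil_append, pvMain]
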